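-- pv_equiv track=rewrite | github.com/naomileenaomi/syn-spellout-learner | syn-spellout-learner.py | feature_vector_translator
-- ===== SOURCE A (Python) =====
-- def feature_vector_translator(featuresAsSet,masterFeatureList):
--     translatedVector = []
--     prevUnseenFeats = [observationFeat
--                              for observationFeat in featuresAsSet
--                              if observationFeat not in masterFeatureList]
--     masterFeatureList = masterFeatureList + prevUnseenFeats
--     for feature in masterFeatureList:
--         translatedVector.append(int(feature in featuresAsSet))
--     return translatedVector, masterFeatureList
-- ===== SOURCE B (Python) =====
-- def feature_vector_translator(featuresAsSet, masterFeatureList):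
--     # Index every master-list position by feature once, then scatter-mark:
--     # iterate over featuresAsSet, setting vec[i] = 1 at the indexed positions,
--     # and appending unseen features (with a 1 entry) as they come.
--     positions = {}
--     for i, m in enumerate(masterFeatureList):
--         positions.setdefault(m, []).append(i)
--     vec = [0] * len(masterFeatureList)
--     ext = []
--     extVec = []
--     for f in featuresAsSet:
--         if f in positions:
--             for i in positions[f]:
--                 vec[i] = 1
--         else:
--             ext.append(f)
--             extVec.append(1)
--     return vec + extVec, masterFeatureList + ext
-- ===== Notes on version B (the rewrite author's own statement) =====
-- stated objective: faster
-- what changed: A gathers: it membership-tests every element of the extended master list against featuresAsSet (a linear scan per element); B inverts the loop into a scatter: it builds a hash index (feature -> list of positions) over the master list once, starts from an all-zero vector, and iterates over featuresAsSet marking indexed positions to 1 and appending unseen features as they come; the input list is not mutated.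
import Mathlib
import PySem

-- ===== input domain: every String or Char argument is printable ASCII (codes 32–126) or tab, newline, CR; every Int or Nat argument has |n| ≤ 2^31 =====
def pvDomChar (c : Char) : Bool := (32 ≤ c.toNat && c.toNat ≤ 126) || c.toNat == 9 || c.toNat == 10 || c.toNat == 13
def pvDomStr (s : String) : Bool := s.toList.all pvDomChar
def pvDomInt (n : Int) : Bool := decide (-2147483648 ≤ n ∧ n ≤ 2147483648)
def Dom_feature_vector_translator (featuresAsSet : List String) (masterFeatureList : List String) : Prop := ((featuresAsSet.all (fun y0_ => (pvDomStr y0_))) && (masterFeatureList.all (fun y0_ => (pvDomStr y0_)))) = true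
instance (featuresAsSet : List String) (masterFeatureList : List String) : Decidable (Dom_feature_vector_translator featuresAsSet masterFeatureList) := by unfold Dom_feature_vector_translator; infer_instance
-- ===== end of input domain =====

-- B replaces A's gather (membership-test every extended-master element) by a scatter: a position index over the master list, an all-zero vector marked to 1 while iterating featuresAsSet (dict index replaces the per-element linear membership scans; input list not mutated).

-- ===== PORT A =====
-- Port of A: filter unseen feats, extend master list, then one uniform append loop over it.
def feature_vector_translator (featuresAsSet : List String) (masterFeatureList : List String) : List Int × List String :=
  let prevUnseenFeats := featuresAsSet.filter (fun f => !(masterFeatureList.contains f))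
  let masterFeatureList' := masterFeatureList ++ prevUnseenFeats
  let translatedVector := masterFeatureList'.foldl
    (fun acc feature => acc ++ [if featuresAsSet.contains feature then (1 : Int) else 0]) []
  (translatedVector, masterFeatureList')

-- ===== PORT B =====
-- Port of B: build a feature -> positions index over the master list (setdefault/append
-- = Dict.modify with default []), then scatter: iterate featuresAsSet over an all-zero
-- vector, marking indexed positions (vec[i] = 1 is pySetD; indices from enumerate are
-- nonnegative) and appending unseen features with their 1-entries as they come.
def feature_vector_translator_alt (featuresAsSet : List String) (masterFeatureList : List String) : List Int × List String :=
  let positions := (PySem.List.enumerate masterFeatureList 0).foldl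
    (fun (d : PySem.Dict String (List Int)) p => d.modify p.2 [] (fun l => l ++ [p.1]))
    PySem.Dict.empty
  let st := featuresAsSet.foldl
    (fun (st : List Int × List String × List Int) f =>
      if positions.contains f then
        ((positions.getD f []).foldl (fun v i => PySem.List.pySetD v i 1) st.1, st.2.1, st.2.2)
      else
        (st.1, st.2.1 ++ [f], st.2.2 ++ [(1 : Int)]))
    (List.replicate masterFeatureList.length 0, [], [])
  (st.1 ++ st.2.2, masterFeatureList ++ st.2.1)

-- ===== PRECONDITION & SPEC =====
def Spec_feature_vector_translator (featuresAsSet : List String) (masterFeatureList : List String) (out : List Int × List String) : Prop := out = feature_vector_translator_alt featuresAsSet masterFeatureList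
instance (featuresAsSet : List String) (masterFeatureList : List String) (out : List Int × List String) : Decidable (Spec_feature_vector_translator featuresAsSet masterFeatureList out) := by unfold Spec_feature_vector_translator; infer_instance

-- ===== CLAIM (what is proved, stated in full; the proofs are below) =====
def Claim_equal_feature_vector_translator : Prop := ∀ (featuresAsSet : List String) (masterFeatureList : List String), Dom_feature_vector_translator featuresAsSet masterFeatureList → Spec_feature_vector_translator featuresAsSet masterFeatureList (feature_vector_translator featuresAsSet masterFeatureList)

-- ===== LEMMAS AND PROOFS =====

-- positions of f in M, as Nat indices (the proof-side view of the index dict)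
def natIdx (M : List String) (f : String) : List Nat :=
  (M.zipIdx.filter (fun p => p.1 == f)).map (fun p => p.2)

lemma mem_natIdx (M : List String) (f : String) (j : Nat) :
    j ∈ natIdx M f ↔ M[j]? = some f := by
  simp only [natIdx, List.mem_map, List.mem_filter]
  constructor
  · rintro ⟨⟨x, k⟩, ⟨hm, hx⟩, rfl⟩
    have := List.mk_mem_zipIdx_iff_getElem?.mp hm
    simp only [beq_iff_eq] at hx
    subst hx; exact this
  · intro h
    exact ⟨(f, j), ⟨List.mk_mem_zipIdx_iff_getElem?.mpr h, by simp⟩, rfl⟩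

lemma natIdx_nil (M : List String) (f : String) (h : M.contains f = false) :
    natIdx M f = [] := by
  have hf : f ∉ M := by simpa using h
  simp only [natIdx, List.map_eq_nil_iff, List.filter_eq_nil_iff]
  rintro ⟨x, k⟩ hm hx
  simp only [beq_iff_eq] at hx
  exact hf (hx ▸ (List.mem_of_getElem? (List.mk_mem_zipIdx_iff_getElem?.mp hm)))

lemma mark_getElem? (ns : List Nat) : ∀ (v : List Int) (j : Nat),
    ((ns.map (fun (n : Nat) => (n : Int))).foldl (fun v i => PySem.List.pySetD v i 1) v)[j]?
      = if j ∈ ns then (if j < v.length then some 1 else none) else v[j]? := by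
  induction ns with
  | nil => intro v j; simp
  | cons n ns ih =>
    intro v j
    rw [List.map_cons, List.foldl_cons, PySem.List.pySetD_natCast, ih, List.length_set,
      List.getElem?_set]
    simp only [List.mem_cons]
    by_cases hj : j ∈ ns
    · simp [hj]
    · by_cases hn : n = j
      · simp [hj, hn]
      · simp [hj, hn, Ne.symm hn]

lemma mark_map (M : List String) (f : String) (g : String → Int) :
    ((natIdx M f).map (fun (n : Nat) => (n : Int))).foldl (fun v i => PySem.List.pySetD v i 1) (M.map g)
      = M.map (fun m => if m == f then 1 else g m) := by
  apply List.ext_getElem?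
  intro j
  rw [mark_getElem?]
  rcases hMj : M[j]? with _ | m
  · have hj : M.length ≤ j := by simpa using hMj
    simp [mem_natIdx, hMj]
  · have hj : j < M.length := (List.getElem?_eq_some_iff.mp hMj).1
    by_cases hmf : m = f
    · subst hmf
      simp [mem_natIdx, hj]
      split_ifs <;> rfl
    · have : ¬ j ∈ natIdx M f := by
        rw [mem_natIdx, hMj]; simpa using fun h => hmf h
      simp [this, hMj, hmf]

lemma loop_split {P : String → Bool} {mk : String → List Int → List Int} :
    ∀ (F : List String) (v : List Int) (ext : List String) (evec : List Int),
    F.foldl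
      (fun (st : List Int × List String × List Int) f =>
        if P f then (mk f st.1, st.2.1, st.2.2) else (st.1, st.2.1 ++ [f], st.2.2 ++ [(1 : Int)]))
      (v, ext, evec)
    = (F.foldl (fun v f => if P f then mk f v else v) v,
       ext ++ F.filter (fun f => !P f),
       evec ++ List.replicate (F.filter (fun f => !P f)).length 1) := by
  intro F
  induction F with
  | nil => intro v ext evec; simp
  | cons f F ih =>
    intro v ext evec
    by_cases hf : P f
    · simp [hf, ih]
    · simp only [List.foldl_cons, hf, if_neg, Bool.not_eq_true, ih, List.filter_cons]
      simp [List.replicate_succ, List.append_assoc]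

lemma vec_fold (M : List String) : ∀ (F : List String) (g : String → Int),
    F.foldl (fun v f => ((natIdx M f).map (fun (n : Nat) => (n : Int))).foldl (fun v i => PySem.List.pySetD v i 1) v) (M.map g)
      = M.map (fun m => if F.contains m then 1 else g m) := by
  intro F
  induction F with
  | nil => intro g; simp
  | cons f F ih =>
    intro g
    rw [List.foldl_cons, mark_map, ih]
    apply List.map_congr_left
    intro m _
    by_cases hmf : m = f
    · subst hmf; simp
    · simp [hmf]

lemma positions_getD (M : List String) (f : String) :
    ((PySem.List.enumerate M 0).foldl
      (fun (d : PySem.Dict String (List Int)) p => d.modify p.2 [] (fun l => l ++ [p.1]))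
      PySem.Dict.empty).getD f []
    = (natIdx M f).map (fun (n : Nat) => (n : Int)) := by
  have h := PySem.Dict.getD_foldl_modify_append
    ((PySem.List.enumerate M 0).map Prod.swap) (PySem.Dict.empty : PySem.Dict String (List Int)) f
  rw [List.foldl_map] at h
  simp only [Prod.fst_swap, Prod.snd_swap] at h
  rw [h]
  simp [PySem.List.enumerate_eq_zipIdx_map, List.map_map, List.filter_map, natIdx,
    Function.comp_def]

lemma positions_contains (M : List String) (f : String) :
    ((PySem.List.enumerate M 0).foldl
      (fun (d : PySem.Dict String (List Int)) p => d.modify p.2 [] (fun l => l ++ [p.1]))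
      PySem.Dict.empty).contains f = M.contains f := by
  have hk := PySem.Dict.keys_foldl_modify_key (PySem.List.enumerate M 0) (fun p => p.2)
    ([] : List Int) (fun _ p l => l ++ [p.1]) PySem.Dict.empty
  rw [Bool.eq_iff_iff]
  rw [PySem.Dict.contains_iff_mem_keys, hk]
  simp [PySem.List.map_snd_enumerate, PySem.Set.update_nil_left, PySem.Set.mem_ofList]

lemma map_ones_of_mem (F : List String) (l : List String) (h : ∀ x ∈ l, F.contains x) :
    l.map (fun f => if F.contains f then (1 : Int) else 0) = List.replicate l.length 1 := by
  induction l with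
  | nil => simp
  | cons x xs ih =>
    have hx : x ∈ F := by simpa using h x (by simp)
    rw [List.map_cons, ih (fun y hy => h y (by simp [hy]))]
    simp [hx, List.replicate_succ]

lemma ports_agree (F M : List String) :
    feature_vector_translator F M = feature_vector_translator_alt F M := by
  simp only [feature_vector_translator, feature_vector_translator_alt]
  have hfn : (fun (st : List Int × List String × List Int) f =>
      if (((PySem.List.enumerate M 0).foldl
          (fun (d : PySem.Dict String (List Int)) p => d.modify p.2 [] (fun l => l ++ [p.1]))
          PySem.Dict.empty)).contains f then
        ((((PySem.List.enumerate M 0).foldl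
          (fun (d : PySem.Dict String (List Int)) p => d.modify p.2 [] (fun l => l ++ [p.1]))
          PySem.Dict.empty)).getD f [] |>.foldl (fun v i => PySem.List.pySetD v i 1) st.1, st.2.1, st.2.2)
      else (st.1, st.2.1 ++ [f], st.2.2 ++ [(1 : Int)]))
    = (fun st f =>
      if M.contains f then
        (((natIdx M f).map (fun (n : Nat) => (n : Int))).foldl (fun v i => PySem.List.pySetD v i 1) st.1, st.2.1, st.2.2)
      else (st.1, st.2.1 ++ [f], st.2.2 ++ [(1 : Int)])) := by
    funext st f
    rw [positions_contains, positions_getD]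
  rw [hfn, loop_split (P := fun f => M.contains f)
    (mk := fun f v => ((natIdx M f).map (fun (n : Nat) => (n : Int))).foldl (fun v i => PySem.List.pySetD v i 1) v)
    F (List.replicate M.length 0) [] []]
  have hmk : (fun (v : List Int) f =>
      if M.contains f then ((natIdx M f).map (fun (n : Nat) => (n : Int))).foldl (fun v i => PySem.List.pySetD v i 1) v else v)
    = (fun v f => ((natIdx M f).map (fun (n : Nat) => (n : Int))).foldl (fun v i => PySem.List.pySetD v i 1) v) := by
    funext v f
    by_cases h : M.contains f = true
    · rw [if_pos h]
    · rw [if_neg h, natIdx_nil M f (Bool.not_eq_true _ ▸ h)]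
      simp
  rw [hmk, show List.replicate M.length (0 : Int) = M.map (fun _ => 0) by simp, vec_fold]
  rw [PySem.List.foldl_append_singleton_eq_map, List.map_append,
    map_ones_of_mem F (F.filter (fun f => !(M.contains f)))
      (fun x hx => by simpa using (List.mem_filter.mp hx).1)]
  simp

-- ===== VERDICT (by name: the statement is the Claim_ definition above) =====
theorem feature_vector_translator_spec : Claim_equal_feature_vector_translator := by
  intro F M _
  exact ports_agree F M
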